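-- pv_equiv track=rewrite | github.com/libamtrack/ReGenerator | scripts/expressions.py | _find_op_left
-- ===== SOURCE A (Python) =====
-- from typing import Optional
--
-- def _find_op_left(text: str, op: str) -> Optional[int]:
--     brackets = 0
--     for i, c in enumerate(text):
--         if c == op and brackets == 0:
--             return i
--         elif c == '(':
--             brackets += 1
--         elif c == ')':
--             brackets -= 1
--     return None
-- ===== SOURCE B (Python) =====
-- from itertools import accumulate
-- from typing import Optional
--
-- def _find_op_left(text: str, op: str) -> Optional[int]:
--     # depth[i] = bracket depth BEFORE text[i] (accumulate with initial=0)
--     deltas = (1 if c == '(' else -1 if c == ')' else 0 for c in text)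
--     depth = list(accumulate(deltas, initial=0))
--     return next((i for i, c in enumerate(text) if c == op and depth[i] == 0), None)
-- ===== Notes on version B (the rewrite author's own statement) =====
-- stated objective: alternative
-- what changed: Replaces the interleaved depth-tracking scan (running counter mutated inside the search loop) by two decoupled passes: first build a depth-before-each-char table with itertools.accumulate, then query it with a generator expression via next(..., None).
import Mathlib
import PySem

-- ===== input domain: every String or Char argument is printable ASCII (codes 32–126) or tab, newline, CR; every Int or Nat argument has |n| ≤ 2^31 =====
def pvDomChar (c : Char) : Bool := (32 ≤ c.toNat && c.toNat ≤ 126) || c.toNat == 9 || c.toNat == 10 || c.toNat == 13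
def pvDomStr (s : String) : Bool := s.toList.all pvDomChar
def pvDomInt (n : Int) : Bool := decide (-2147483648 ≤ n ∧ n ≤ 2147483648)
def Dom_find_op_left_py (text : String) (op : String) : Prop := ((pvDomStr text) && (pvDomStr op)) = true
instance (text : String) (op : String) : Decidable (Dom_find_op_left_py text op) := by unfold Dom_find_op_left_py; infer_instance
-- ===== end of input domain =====

-- B replaces A's single scan with a mutating depth counter by two decoupled passes
-- (a scanl-built depth table, then a find? query over it); alternative decomposition, same cost.

-- ===== PORT A =====
-- literal port of A's loop: running index i, running `brackets` counter b
def pvALoop (op : String) : List Char → Int → Int → Option Int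
  | [], _, _ => none
  | c :: rest, i, b =>
    if String.ofList [c] = op ∧ b = 0 then some i
    else pvALoop op rest (i + 1) (if c = '(' then b + 1 else if c = ')' then b - 1 else b)

def find_op_left_py (text : String) (op : String) : Option Int :=
  pvALoop op text.toList 0 0

-- ===== PORT B =====
def pvDelta (c : Char) : Int := if c = '(' then 1 else if c = ')' then -1 else 0

def find_op_left_py_alt (text : String) (op : String) : Option Int :=
  let cs := text.toList
  let depth := cs.scanl (fun d c => d + pvDelta c) 0   -- depth before each char (accumulate, initial=0)
  ((cs.zip depth).zipIdx.find?
      (fun x => decide (String.ofList [x.1.1] = op) && decide (x.1.2 = (0 : Int)))).map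
    (fun x => (x.2 : Int))

-- ===== PRECONDITION & SPEC =====
def Spec_find_op_left_py (text : String) (op : String) (out : Option Int) : Prop := out = find_op_left_py_alt text op
instance (text : String) (op : String) (out : Option Int) : Decidable (Spec_find_op_left_py text op out) := by unfold Spec_find_op_left_py; infer_instance

-- ===== CLAIM (what is proved, stated in full; the proofs are below) =====
def Claim_equal_find_op_left_py : Prop := ∀ (text : String) (op : String), Dom_find_op_left_py text op → Spec_find_op_left_py text op (find_op_left_py text op)

-- ===== LEMMAS AND PROOFS =====
lemma pv_loop_eq (op : String) : ∀ (cs : List Char) (k : Nat) (b : Int),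
    pvALoop op cs (k : Int) b =
      (((cs.zip (cs.scanl (fun d c => d + pvDelta c) b)).zipIdx k).find?
          (fun x => decide (String.ofList [x.1.1] = op) && decide (x.1.2 = (0 : Int)))).map
        (fun x => (x.2 : Int)) := by
  intro cs
  induction cs with
  | nil => intro k b; simp [pvALoop]
  | cons c rest ih =>
    intro k b
    by_cases h : String.ofList [c] = op ∧ b = 0
    · simp [pvALoop, h, List.scanl_cons, List.zipIdx_cons]
    · have hb : (if c = '(' then b + 1 else if c = ')' then b - 1 else b) = b + pvDelta c := by
        unfold pvDelta; split_ifs <;> ring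
      have hfalse : (decide (String.ofList [c] = op) && decide (b = (0 : Int))) = false := by
        rcases not_and_or.mp h with h' | h' <;> simp [h']
      have := ih (k + 1) (b + pvDelta c)
      simp only [pvALoop, if_neg h, hb, List.scanl_cons, List.zip_cons_cons, List.zipIdx_cons,
        List.find?_cons, hfalse, Nat.cast_add, Nat.cast_one] at *
      exact this

-- ===== VERDICT (by name: the statement is the Claim_ definition above) =====
theorem find_op_left_py_spec : Claim_equal_find_op_left_py := by
  intro text op _
  unfold Spec_find_op_left_py find_op_left_py find_op_left_py_alt
  simpa using pv_loop_eq op text.toList 0 0
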